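-- pv_equiv track=rewrite | github.com/shivaram171/snakewatergun_game | snakewatergun.py | snakewatergun
-- ===== SOURCE A (Python) =====
-- def snakewatergun(input):
--     result={
--         ("snake" , "water" ): 'A',
--         ("snake" , "gun" ): 'B',
--         ("snake" , "snake" ): 'None',
--         ("water" , "gun" ): 'A',
--         ("water" , "snake" ): 'B',
--         ("water" , "water" ): 'None',
--         ("gun" , "water" ): 'B',
--         ("gun" , "snake" ): 'A',
--         ("gun" , "gun" ): 'None',
--     }
--     A_win=0
--     moves = game_move(input)
--     for i in range(0, len(moves) - 1, 2):
--         A_move=moves[i]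
--         B_move=moves[i+1]
--         winner = result.get((A_move,B_move))
--         if winner == 'A':
--             A_win += 1
--     return A_win
--
-- def game_move(input):
--     moves=[]
--     i =0
--     while i < len(input):
--         if input[i]=="s":
--             move = "snake"
--             moves.append(move)
--             i=i+5
--         elif input[i]=="w":
--             move = "water"
--             moves.append(move)
--             i=i+5
--         elif input[i]=="g":
--             move="gun"
--             moves.append(move)
--             i=i+3
--         else:
--             i=i+1
--     return moves
-- ===== SOURCE B (Python) =====
-- def snakewatergun(input):
--     # Single pass over the raw string: decode moves inline, pair them on the fly.
--     wins = 0
--     pending = -1  # code of an unpaired A-move; -1 = waiting for an A-move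
--     i = 0
--     n = len(input)
--     while i < n:
--         c = input[i]
--         if c == 's':
--             code, step = 0, 5
--         elif c == 'w':
--             code, step = 1, 5
--         elif c == 'g':
--             code, step = 2, 3
--         else:
--             i += 1
--             continue
--         if pending < 0:
--             pending = code
--         else:
--             if (pending - code) % 3 == 2:
--                 wins += 1
--             pending = -1
--         i += step
--     return wins
-- ===== Notes on version B (the rewrite author's own statement) =====
-- stated objective: faster
-- what changed: B replaces A's two-phase scheme (tokenize the string into a list of move words, then a second indexed pass over even positions with a 9-entry result dict) by a single inline pass over the raw string that pairs moves on the fly and decides a win arithmetically via (pending-code)%3==2 over codes snake=0,water=1,gun=2, building no intermediate list and no dict.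
import Mathlib
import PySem

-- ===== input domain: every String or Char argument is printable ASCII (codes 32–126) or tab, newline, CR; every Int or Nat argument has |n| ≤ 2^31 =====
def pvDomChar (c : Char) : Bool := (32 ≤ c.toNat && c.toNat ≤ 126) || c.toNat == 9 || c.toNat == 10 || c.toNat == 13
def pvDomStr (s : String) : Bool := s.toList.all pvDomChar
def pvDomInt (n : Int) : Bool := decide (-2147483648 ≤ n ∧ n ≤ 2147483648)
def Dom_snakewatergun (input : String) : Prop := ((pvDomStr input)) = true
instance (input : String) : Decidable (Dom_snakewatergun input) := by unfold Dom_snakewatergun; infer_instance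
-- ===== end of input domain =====

-- B replaces A's tokenize-into-a-list-then-pair-by-index scheme by one inlined linear pass with arithmetic win test (constant-factor faster: no intermediate list, no dict).

-- ===== PORT A =====
-- while-loop of game_move: advancing i by 5/5/3/1 is dropping that many characters
def gameMove : List Char → List String
  | [] => []
  | c :: rest =>
    if c = 's' then "snake" :: gameMove (rest.drop 4)
    else if c = 'w' then "water" :: gameMove (rest.drop 4)
    else if c = 'g' then "gun" :: gameMove (rest.drop 2)
    else gameMove rest
  termination_by l => l.length
  decreasing_by all_goals (simp; try omega)

def swgResult : PySem.Dict (String × String) String :=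
  PySem.Dict.ofList
    [ (("snake", "water"), "A"), (("snake", "gun"), "B"), (("snake", "snake"), "None"),
      (("water", "gun"), "A"), (("water", "snake"), "B"), (("water", "water"), "None"),
      (("gun", "water"), "B"), (("gun", "snake"), "A"), (("gun", "gun"), "None") ]

def snakewatergun (input : String) : Int :=
  let moves := gameMove input.toList
  (PySem.List.pyRange 0 ((moves.length : Int) - 1) 2).foldl
    (fun A_win i =>
      let A_move := PySem.List.pyGetD moves i ""
      let B_move := PySem.List.pyGetD moves (i + 1) ""
      let winner := PySem.Dict.get? swgResult (A_move, B_move)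
      if winner = some "A" then A_win + 1 else A_win) 0

-- ===== PORT B =====
-- decode a character: move code (snake 0, water 1, gun 2) and jump length, none = skip
def decodeMove (c : Char) : Option (Int × Nat) :=
  if c = 's' then some (0, 5)
  else if c = 'w' then some (1, 5)
  else if c = 'g' then some (2, 3)
  else none

-- Source B's while loop; i += step is dropping (step-1) chars after the current one
def altLoop : List Char → Int → Int → Int
  | [], _, wins => wins
  | c :: rest, pending, wins =>
    match decodeMove c with
    | none => altLoop rest pending wins
    | some (code, step) =>
      let rest' := rest.drop (step - 1)
      if pending < 0 then altLoop rest' code wins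
      else altLoop rest' (-1)
        (wins + (if PySem.Int.mod (pending - code) 3 = 2 then 1 else 0))
  termination_by l _ _ => l.length
  decreasing_by all_goals (simp; try omega)

def snakewatergun_alt (input : String) : Int := altLoop input.toList (-1) 0

-- ===== PRECONDITION & SPEC =====
def Spec_snakewatergun (input : String) (out : Int) : Prop := out = snakewatergun_alt input
instance (input : String) (out : Int) : Decidable (Spec_snakewatergun input out) := by unfold Spec_snakewatergun; infer_instance

-- ===== CLAIM (what is proved, stated in full; the proofs are below) =====
def Claim_equal_snakewatergun : Prop := ∀ (input : String), Dom_snakewatergun input → Spec_snakewatergun input (snakewatergun input)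

-- ===== LEMMAS AND PROOFS =====

def mcode (m : String) : Int := if m = "snake" then 0 else if m = "water" then 1 else 2

def winN (p q : Int) : Int := if PySem.Int.mod (p - q) 3 = 2 then 1 else 0

def cntN : List String → Int
  | [] => 0
  | [_] => 0
  | x :: y :: r => winN (mcode x) (mcode y) + cntN r

def pcnt (p : Int) : List String → Int
  | [] => 0
  | m :: r => winN p (mcode m) + cntN r

def cntD : List String → Int
  | [] => 0
  | [_] => 0
  | x :: y :: r => (if PySem.Dict.get? swgResult (x, y) = some "A" then 1 else 0) + cntD r

lemma cntN_cons (m : String) (ms : List String) : cntN (m :: ms) = pcnt (mcode m) ms := by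
  cases ms <;> rfl

lemma mcode_snake : mcode "snake" = 0 := by decide
lemma mcode_water : mcode "water" = 1 := by decide
lemma mcode_gun : mcode "gun" = 2 := by decide

lemma altLoop_eq : ∀ (l : List Char) (p wins : Int),
    altLoop l p wins = wins + (if p < 0 then cntN (gameMove l) else pcnt p (gameMove l)) := by
  intro l
  induction l using gameMove.induct with
  | case1 => intro p wins; by_cases hp : p < 0 <;> simp [altLoop, gameMove, cntN, pcnt, hp]
  | case2 rest ih =>
    intro p wins
    by_cases hp : p < 0 <;>
      simp [altLoop, decodeMove, gameMove, hp, ih, cntN_cons, mcode_snake, pcnt, winN] <;>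
      try ring_nf
  | case3 rest h1 ih =>
    intro p wins
    by_cases hp : p < 0 <;>
      simp [altLoop, decodeMove, gameMove, h1, hp, ih, cntN_cons, mcode_water, pcnt, winN] <;>
      try ring_nf
  | case4 rest h1 h2 ih =>
    intro p wins
    by_cases hp : p < 0 <;>
      simp [altLoop, decodeMove, gameMove, h1, h2, hp, ih, cntN_cons, mcode_gun, pcnt, winN] <;>
      try ring_nf
  | case5 c rest h1 h2 h3 ih =>
    intro p wins
    simp [altLoop, gameMove, decodeMove, h1, h2, h3, ih]

lemma rangeTwo (L : Nat) :
    PySem.List.pyRange 0 ((L : Int) - 1) 2 = (List.range (L / 2)).map (fun (k : Nat) => (2 : Int) * (k : Int)) := by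
  rw [PySem.List.pyRange_of_pos _ _ (by norm_num)]
  have h1 : (if (0:Int) < (L : Int) - 1 then (((L : Int) - 1 - 0 + 2 - 1) / 2).toNat else 0) = L / 2 := by
    split_ifs with h <;> omega
  rw [h1]
  simp only [zero_add]

lemma foldl_pairs_nat (ms : List String) : ∀ acc : Int,
    (List.range (ms.length / 2)).foldl
      (fun a k =>
        if PySem.Dict.get? swgResult (ms.getD (2 * k) "", ms.getD (2 * k + 1) "") = some "A"
        then a + 1 else a) acc = acc + cntD ms := by
  induction ms using cntD.induct with
  | case1 => intro acc; simp [cntD]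
  | case2 x => intro acc; simp [cntD]
  | case3 x y r ih =>
    intro acc
    have hlen : (x :: y :: r).length / 2 = r.length / 2 + 1 := by simp; omega
    rw [hlen, List.range_succ_eq_map, List.foldl_cons, List.foldl_map]
    have hb : (fun (a : Int) (k : Nat) =>
        if PySem.Dict.get? swgResult
            ((x :: y :: r).getD (2 * k.succ) "", (x :: y :: r).getD (2 * k.succ + 1) "") = some "A"
        then a + 1 else a)
        = fun a k =>
        if PySem.Dict.get? swgResult (r.getD (2 * k) "", r.getD (2 * k + 1) "") = some "A"
        then a + 1 else a := by
      funext a k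
      have e1 : 2 * k.succ = (2 * k) + 1 + 1 := by omega
      have e2 : 2 * k.succ + 1 = (2 * k + 1) + 1 + 1 := by omega
      rw [e2, e1]
      simp only [List.getD_cons_succ]
    rw [hb, ih]
    norm_num [List.getD_cons_zero, List.getD_cons_succ, cntD]
    split_ifs <;> ring

lemma mem_gameMove : ∀ (l : List Char), ∀ m ∈ gameMove l, m = "snake" ∨ m = "water" ∨ m = "gun" := by
  intro l
  induction l using gameMove.induct with
  | case1 => simp [gameMove]
  | case2 rest ih =>
    intro m hm; simp [gameMove] at hm
    rcases hm with h | h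
    · exact Or.inl h
    · exact ih m h
  | case3 rest h1 ih =>
    intro m hm; simp [gameMove, h1] at hm
    rcases hm with h | h
    · exact Or.inr (Or.inl h)
    · exact ih m h
  | case4 rest h1 h2 ih =>
    intro m hm; simp [gameMove, h1, h2] at hm
    rcases hm with h | h
    · exact Or.inr (Or.inr h)
    · exact ih m h
  | case5 c rest h1 h2 h3 ih =>
    intro m hm; simp [gameMove, h1, h2, h3] at hm
    exact ih m hm

lemma dict_win (x y : String) (hx : x = "snake" ∨ x = "water" ∨ x = "gun")
    (hy : y = "snake" ∨ y = "water" ∨ y = "gun") :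
    (if PySem.Dict.get? swgResult (x, y) = some "A" then (1 : Int) else 0) = winN (mcode x) (mcode y) := by
  rcases hx with h | h | h <;> rcases hy with h' | h' | h' <;> subst h <;> subst h' <;> decide

lemma cntD_eq_cntN : ∀ ms : List String,
    (∀ m ∈ ms, m = "snake" ∨ m = "water" ∨ m = "gun") → cntD ms = cntN ms := by
  intro ms
  induction ms using cntD.induct with
  | case1 => intro _; rfl
  | case2 x => intro _; rfl
  | case3 x y r ih =>
    intro h
    simp only [cntD, cntN]
    rw [dict_win x y (h x (by simp)) (h y (by simp)), ih (fun m hm => h m (by simp [hm]))]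

lemma A_eq (input : String) : snakewatergun input = cntD (gameMove input.toList) := by
  show (PySem.List.pyRange 0 (((gameMove input.toList).length : Int) - 1) 2).foldl
      (fun A_win i =>
        if PySem.Dict.get? swgResult
            (PySem.List.pyGetD (gameMove input.toList) i "",
              PySem.List.pyGetD (gameMove input.toList) (i + 1) "") = some "A"
        then A_win + 1 else A_win) 0 = cntD (gameMove input.toList)
  generalize gameMove input.toList = ms
  rw [rangeTwo, List.foldl_map]
  have hb : (fun (x : Int) (y : Nat) =>
      if PySem.Dict.get? swgResult
          (PySem.List.pyGetD ms (2 * (y : Int)) "", PySem.List.pyGetD ms (2 * (y : Int) + 1) "") = some "A"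
      then x + 1 else x)
      = fun x y =>
      if PySem.Dict.get? swgResult (ms.getD (2 * y) "", ms.getD (2 * y + 1) "") = some "A"
      then x + 1 else x := by
    funext x y
    have e2 : (2 * (y : Int) + 1) = ((2 * y + 1 : Nat) : Int) := by push_cast; ring
    have e1 : (2 * (y : Int)) = ((2 * y : Nat) : Int) := by push_cast; ring
    rw [e2, e1, PySem.List.pyGetD_natCast, PySem.List.pyGetD_natCast]
  rw [hb]
  simpa using foldl_pairs_nat ms 0

-- ===== VERDICT (by name: the statement is the Claim_ definition above) =====
theorem snakewatergun_spec : Claim_equal_snakewatergun := by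
  intro input _
  unfold Spec_snakewatergun
  rw [A_eq, cntD_eq_cntN _ (mem_gameMove _)]
  unfold snakewatergun_alt
  rw [altLoop_eq]
  norm_num
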